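-- pv_equiv track=rewrite | github.com/tyumentsev4/cdma | cdma.py | symbols_to_message
-- ===== SOURCE A (Python) =====
-- def symbols_to_message(symbols: list[int]) -> str:
--     """Преобразует оцененные символы в сообщение (строку).
--
--     Args:
--         symbols (list[int]): Список оцененных символов.
--
--     Returns:
--         str: Восстановленное сообщение.
--     """
--     binary_message = ""
--     for symbol in symbols:
--         binary_message += "1" if symbol > 0 else "0"
--
--     chars = []
--     for i in range(0, len(binary_message), 8):
--         byte = binary_message[i : i + 8]
--         ascii_code = int(byte, 2)
--         chars.append(chr(ascii_code))
--
--     return "".join(chars)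
-- ===== SOURCE B (Python) =====
-- def symbols_to_message(symbols: list[int]) -> str:
--     """Single pass: accumulate bits into an integer, flush every 8 bits."""
--     chars = []
--     value = 0
--     count = 0
--     for symbol in symbols:
--         value = value * 2 + (1 if symbol > 0 else 0)
--         count += 1
--         if count == 8:
--             chars.append(chr(value))
--             value = 0
--             count = 0
--     if count != 0:
--         chars.append(chr(value))
--     return "".join(chars)
-- ===== Notes on version B (the rewrite author's own statement) =====
-- stated objective: simpler
-- what changed: One streaming pass with an integer bit-accumulator and a counter (flush every 8 bits, plus a final partial flush) replaces building an intermediate '0'/'1' string and re-parsing each 8-character chunk with int(byte, 2).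
import Mathlib
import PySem

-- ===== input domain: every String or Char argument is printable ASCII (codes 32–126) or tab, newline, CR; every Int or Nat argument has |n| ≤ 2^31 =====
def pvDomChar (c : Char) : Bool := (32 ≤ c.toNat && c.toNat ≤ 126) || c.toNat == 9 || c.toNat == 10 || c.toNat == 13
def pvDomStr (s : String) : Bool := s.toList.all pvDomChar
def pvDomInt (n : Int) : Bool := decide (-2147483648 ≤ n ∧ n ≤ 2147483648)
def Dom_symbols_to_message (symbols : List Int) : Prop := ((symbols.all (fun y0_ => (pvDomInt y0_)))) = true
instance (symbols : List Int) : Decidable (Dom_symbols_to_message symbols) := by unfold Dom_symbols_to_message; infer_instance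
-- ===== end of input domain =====

-- B replaces A's intermediate '0'/'1' string plus chunked int(byte,2) re-parse by one
-- streaming pass with an integer bit-accumulator (simpler; same behaviour incl. trailing partial byte).

-- ===== PORT A =====
-- hand port of int(byte, 2): exact for the inputs it receives here, which are always
-- NONEMPTY strings made only of '0'/'1' characters (no sign/space/prefix/underscore)
def pvBinVal (cs : List Char) : Int :=
  cs.foldl (fun v c => v * 2 + (if c = '1' then 1 else 0)) 0

def symbols_to_message (symbols : List Int) : String :=
  let binary_message : List Char :=
    symbols.foldl (fun acc symbol => acc ++ [if symbol > 0 then '1' else '0']) []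
  let chars : List Char :=
    (PySem.List.pyRange 0 (binary_message.length : Int) 8).foldl
      (fun chars i =>
        let byte := PySem.List.slice binary_message (some i) (some (i + 8))
        let ascii_code := pvBinVal byte
        chars ++ [Char.ofNat ascii_code.toNat]) []
  String.ofList chars

-- ===== PORT B =====
def symbols_to_message_alt (symbols : List Int) : String :=
  let st := symbols.foldl
    (fun (st : List Char × Int × Nat) symbol =>
      let value := st.2.1 * 2 + (if symbol > 0 then 1 else 0)
      let count := st.2.2 + 1
      if count = 8 then (st.1 ++ [Char.ofNat value.toNat], 0, 0)
      else (st.1, value, count))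
    ([], 0, 0)
  String.ofList (if st.2.2 ≠ 0 then st.1 ++ [Char.ofNat st.2.1.toNat] else st.1)

-- ===== PRECONDITION & SPEC =====
def Spec_symbols_to_message (symbols : List Int) (out : String) : Prop := out = symbols_to_message_alt symbols
instance (symbols : List Int) (out : String) : Decidable (Spec_symbols_to_message symbols out) := by unfold Spec_symbols_to_message; infer_instance

-- ===== CLAIM (what is proved, stated in full; the proofs are below) =====
def Claim_equal_symbols_to_message : Prop := ∀ (symbols : List Int), Dom_symbols_to_message symbols → Spec_symbols_to_message symbols (symbols_to_message symbols)

-- ===== LEMMAS AND PROOFS =====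

-- the bit character of a symbol, and the bit value of a character
def pvBitC (s : Int) : Char := if s > 0 then '1' else '0'

def pvBinValFrom (v : Int) (cs : List Char) : Int :=
  cs.foldl (fun v c => v * 2 + (if c = '1' then 1 else 0)) v

-- reference decoder: consume 8-character chunks
def pvG (l : List Char) : List Char :=
  if h : l = [] then []
  else Char.ofNat (pvBinVal (l.take 8)).toNat :: pvG (l.drop 8)
  termination_by l.length
  decreasing_by have := List.length_pos_iff.mpr h; simp [List.length_drop]; omega

-- streaming decoder with partial state (value v, bit count c)
def pvGp (v : Int) (c : Nat) : List Char → List Char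
  | [] => if c = 0 then [] else [Char.ofNat v.toNat]
  | x :: xs =>
    let v' := v * 2 + (if x = '1' then 1 else 0)
    if c + 1 = 8 then Char.ofNat v'.toNat :: pvGp 0 0 xs
    else pvGp v' (c + 1) xs

theorem pvGp_short (l : List Char) : ∀ v c, c < 8 → c + l.length < 8 →
    pvGp v c l = if c + l.length = 0 then [] else [Char.ofNat (pvBinValFrom v l).toNat] := by
  induction l with
  | nil => intro v c _ _; simp [pvGp, pvBinValFrom]
  | cons x xs ih =>
    intro v c hc hlen
    simp only [List.length_cons] at hlen
    have h8 : ¬ (c + 1 = 8) := by omega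
    simp only [pvGp, h8, if_false]
    rw [ih _ (c+1) (by omega) (by omega)]
    rw [if_neg (show ¬ (c + 1 + xs.length = 0) by omega),
        if_neg (show ¬ (c + (x :: xs).length = 0) by simp)]
    simp [pvBinValFrom]

theorem pvGp_run (l : List Char) : ∀ v c, c < 8 → 8 ≤ c + l.length →
    pvGp v c l = Char.ofNat (pvBinValFrom v (l.take (8 - c))).toNat :: pvGp 0 0 (l.drop (8 - c)) := by
  induction l with
  | nil => intro v c hc hlen; simp at hlen; omega
  | cons x xs ih =>
    intro v c hc hlen
    obtain ⟨d, hd⟩ : ∃ d, 8 - c = d + 1 := ⟨7 - c, by omega⟩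
    rw [hd, List.take_succ_cons, List.drop_succ_cons]
    by_cases h8 : c + 1 = 8
    · have hd0 : d = 0 := by omega
      simp [pvGp, h8, hd0, pvBinValFrom]
    · simp only [pvGp, h8, if_false]
      rw [ih _ (c+1) (by omega) (by simp at hlen ⊢; omega)]
      have : 8 - (c + 1) = d := by omega
      simp [this, pvBinValFrom]

theorem pvGp_eq_pvG (n : Nat) : ∀ l : List Char, l.length = n → pvGp 0 0 l = pvG l := by
  induction n using Nat.strong_induction_on with
  | _ n ih =>
    intro l hl
    by_cases hnil : l = []
    · simp only [hnil]; rw [pvG.eq_def]; simp [pvGp]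
    · rw [pvG.eq_def]; simp only [hnil, dite_false]
      by_cases hlen : l.length < 8
      · rw [pvGp_short l 0 0 (by omega) (by omega)]
        have h1 : l.take 8 = l := List.take_of_length_le (by omega)
        have h2 : l.drop 8 = [] := List.drop_eq_nil_of_le (by omega)
        simp [hnil, h1, h2, pvG, pvBinVal, pvBinValFrom]
      · rw [pvGp_run l 0 0 (by omega) (by omega)]
        have : pvGp 0 0 (l.drop 8) = pvG (l.drop 8) := by
          apply ih (l.drop 8).length
          · simp [List.length_drop, hl]
            have : l.length ≠ 0 := by simp [List.length_eq_zero_iff, hnil]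
            omega
          · rfl
        simp [this, pvBinVal, pvBinValFrom]

-- A's chunk map equals the reference decoder
theorem pvMap_eq_pvG (n : Nat) : ∀ l : List Char, l.length = n →
    (List.range ((l.length + 7) / 8)).map
        (fun k => Char.ofNat (pvBinVal ((l.drop (8 * k)).take 8)).toNat) = pvG l := by
  induction n using Nat.strong_induction_on with
  | _ n ih =>
    intro l hl
    by_cases hnil : l = []
    · simp only [hnil]; rw [pvG.eq_def]; simp
    · have hpos : l.length ≠ 0 := by simp [List.length_eq_zero_iff, hnil]
      obtain ⟨K, hK⟩ : ∃ K, (l.length + 7) / 8 = K + 1 :=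
        ⟨(l.length + 7) / 8 - 1, by omega⟩
      have hK' : ((l.drop 8).length + 7) / 8 = K := by
        simp only [List.length_drop]; omega
      rw [hK, List.range_succ_eq_map, List.map_cons, List.map_map]
      rw [pvG.eq_def]; simp only [hnil, dite_false]
      congr 1
      rw [← hK']
      rw [← ih (l.drop 8).length (by simp [List.length_drop, hl]; omega) (l.drop 8) rfl]
      apply List.map_congr_left
      intro k _
      have hdd : l.drop (8 * (k + 1)) = (l.drop 8).drop (8 * k) := by
        rw [List.drop_drop]; congr 1; omega
      simp only [Function.comp_apply, Nat.succ_eq_add_one, hdd]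

-- rewrite A's foldl over pyRange into the chunk map
theorem pvA_chars (l : List Char) :
    (PySem.List.pyRange 0 (l.length : Int) 8).foldl
      (fun chars i => chars ++ [Char.ofNat (pvBinVal (PySem.List.slice l (some i) (some (i + 8)))).toNat]) []
    = (List.range ((l.length + 7) / 8)).map
        (fun k => Char.ofNat (pvBinVal ((l.drop (8 * k)).take 8)).toNat) := by
  rw [PySem.List.foldl_append_singleton_eq_map]
  rw [PySem.List.pyRange_of_pos 0 (l.length : Int) (by norm_num)]
  have hcnt : (if (0:Int) < (l.length : Int) then (((l.length : Int) - 0 + 8 - 1) / 8).toNat else 0)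
      = (l.length + 7) / 8 := by
    by_cases h : l.length = 0
    · simp [h]
    · have h0 : (0:Int) < (l.length : Int) := by exact_mod_cast Nat.pos_of_ne_zero h
      have : ((l.length : Int) - 0 + 8 - 1) = ((l.length + 7 : Nat) : Int) := by push_cast; ring
      rw [if_pos h0]; omega
  rw [hcnt, List.map_map]
  apply List.map_congr_left
  intro k _
  simp only [Function.comp, zero_add]
  congr 1
  have h2 : (8 : Int) * (k : Int) + 8 = ((8 * k : Nat) : Int) + ((8 : Nat) : Int) := by push_cast; ring
  have h1 : (8 : Int) * (k : Int) = ((8 * k : Nat) : Int) := by push_cast; ring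
  rw [h2, h1, PySem.List.slice_natCast_add]

-- B's step function (the loop body of the port, named so the fold lemma can be stated)
def pvStep (st : List Char × Int × Nat) (x : Char) : List Char × Int × Nat :=
  let value := st.2.1 * 2 + (if x = '1' then 1 else 0)
  let count := st.2.2 + 1
  if count = 8 then (st.1 ++ [Char.ofNat value.toNat], 0, 0)
  else (st.1, value, count)

def pvFin (st : List Char × Int × Nat) : List Char :=
  if st.2.2 ≠ 0 then st.1 ++ [Char.ofNat st.2.1.toNat] else st.1

-- B's foldl (over chars, after foldl_map) with finalization equals pvGp
theorem pvB_fold (l : List Char) : ∀ out v c, c < 8 →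
    pvFin (l.foldl pvStep (out, v, c)) = out ++ pvGp v c l := by
  induction l with
  | nil =>
    intro out v c _
    by_cases h : c = 0 <;> simp [pvGp, pvFin, h]
  | cons x xs ih =>
    intro out v c hc
    simp only [List.foldl_cons]
    by_cases h8 : c + 1 = 8
    · have hs : pvStep (out, v, c) x
          = (out ++ [Char.ofNat (v * 2 + (if x = '1' then 1 else 0)).toNat], 0, 0) := by
        simp [pvStep, h8]
      rw [hs, ih _ 0 0 (by omega)]
      simp [pvGp, h8, List.append_assoc]
    · have hs : pvStep (out, v, c) x
          = (out, v * 2 + (if x = '1' then 1 else 0), c + 1) := by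
        simp [pvStep, h8]
      rw [hs, ih _ _ (c + 1) (by omega)]
      simp [pvGp, h8]

-- ===== VERDICT (by name: the statement is the Claim_ definition above) =====
theorem symbols_to_message_spec : Claim_equal_symbols_to_message := by
  intro symbols _
  unfold Spec_symbols_to_message symbols_to_message symbols_to_message_alt
  rw [PySem.List.foldl_append_singleton_eq_map]
  simp only [List.nil_append]
  set l : List Char := symbols.map (fun s => if s > 0 then '1' else '0') with hl
  -- A side
  rw [pvA_chars l, pvMap_eq_pvG l.length l rfl]
  -- B side: turn the fold over symbols into a fold over l
  have hfold :
      symbols.foldl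
        (fun (st : List Char × Int × Nat) symbol =>
          let value := st.2.1 * 2 + (if symbol > 0 then 1 else 0)
          let count := st.2.2 + 1
          if count = 8 then (st.1 ++ [Char.ofNat value.toNat], 0, 0)
          else (st.1, value, count)) ([], 0, 0)
      = l.foldl pvStep ([], 0, 0) := by
    rw [hl, List.foldl_map]
    congr 1
    funext st s
    by_cases h : s > 0 <;> simp [pvStep, h]
  rw [hfold]
  have hb := pvB_fold l [] 0 0 (by omega)
  rw [pvGp_eq_pvG l.length l rfl] at hb
  simp only [pvFin] at hb
  rw [hb]
  simp
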